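-- pv_equiv track=rewrite | github.com/MrBrantCode/unitest_baseline | mut_generate/mist_train_cf/cf_87348/solution.py | generate_month_list
-- ===== SOURCE A (Python) =====
-- def generate_month_list(months_list, current_month):
--     months = [
--         "January", "February", "March", "April", "May", "June",
--         "July", "August", "September", "October", "November", "December"
--     ]
--     if current_month > 12:
--         return months_list
--     else:
--         months_list.append(months[current_month - 1])
--         return generate_month_list(months_list, current_month + 1)
-- ===== SOURCE B (Python) =====
-- def generate_month_list(months_list, current_month):
--     months = [
--         "January", "February", "March", "April", "May", "June",
--         "July", "August", "September", "October", "November", "December"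
--     ]
--     for m in range(current_month, 13):
--         months_list.append(months[m - 1])
--     return months_list
-- ===== Notes on version B (the rewrite author's own statement) =====
-- stated objective: idiomatic
-- what changed: Replaced the tail recursion with a single iterative for-loop over range(current_month, 13) appending each month name.
import Mathlib
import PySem

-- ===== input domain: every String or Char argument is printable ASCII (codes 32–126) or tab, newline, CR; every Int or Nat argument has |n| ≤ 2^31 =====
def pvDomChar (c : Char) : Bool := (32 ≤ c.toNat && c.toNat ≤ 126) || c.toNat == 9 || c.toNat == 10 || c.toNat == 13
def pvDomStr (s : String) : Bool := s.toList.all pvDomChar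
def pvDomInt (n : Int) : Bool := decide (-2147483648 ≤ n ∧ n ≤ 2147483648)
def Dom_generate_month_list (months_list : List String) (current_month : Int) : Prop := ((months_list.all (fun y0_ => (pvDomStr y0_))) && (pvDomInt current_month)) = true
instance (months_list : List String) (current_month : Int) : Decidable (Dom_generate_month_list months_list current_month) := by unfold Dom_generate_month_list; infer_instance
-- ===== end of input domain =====

-- B replaces A's tail recursion by one iterative loop over range(current_month, 13);
-- both A and B mutate months_list in place (append) and return it — the equivalence proved here is about the return value.

-- ===== PORT A =====
def pvMonths : List String :=
  ["January", "February", "March", "April", "May", "June",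
   "July", "August", "September", "October", "November", "December"]

def generate_month_list (months_list : List String) (current_month : Int) : List String :=
  if current_month > 12 then months_list
  else
    match PySem.List.pyGet? pvMonths (current_month - 1) with
    | none => months_list  -- Python raises IndexError here (excluded by Pre_)
    | some m => generate_month_list (months_list ++ [m]) (current_month + 1)
termination_by (13 - current_month).toNat
decreasing_by omega

-- ===== PORT B =====
def generate_month_list_alt (months_list : List String) (current_month : Int) : List String :=
  (PySem.List.pyRange current_month 13 1).foldl
    (fun acc m =>
      match PySem.List.pyGet? pvMonths (m - 1) with
      | none => acc  -- Python raises IndexError here (excluded by Pre_)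
      | some s => acc ++ [s])
    months_list

-- ===== PRECONDITION & SPEC =====
-- Pre_ excludes exactly current_month ≤ -12, where Python A (and B) raise IndexError on months[current_month-1].
def Pre_generate_month_list (months_list : List String) (current_month : Int) : Prop :=
  -11 ≤ current_month
instance (months_list : List String) (current_month : Int) : Decidable (Pre_generate_month_list months_list current_month) := by unfold Pre_generate_month_list; infer_instance

def pvWitness_generate_month_list : List String × Int := (["x"], 5)

def Spec_generate_month_list (months_list : List String) (current_month : Int) (out : List String) : Prop := out = generate_month_list_alt months_list current_month
instance (months_list : List String) (current_month : Int) (out : List String) : Decidable (Spec_generate_month_list months_list current_month out) := by unfold Spec_generate_month_list; infer_instance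

-- ===== CLAIM (what is proved, stated in full; the proofs are below) =====
def Claim_equal_generate_month_list : Prop := ∀ (months_list : List String) (current_month : Int), Dom_generate_month_list months_list current_month → Pre_generate_month_list months_list current_month → Spec_generate_month_list months_list current_month (generate_month_list months_list current_month)

-- ===== LEMMAS AND PROOFS =====

lemma pvMonths_get_some (i : Int) (h1 : -12 ≤ i) (h2 : i < 12) :
    ∃ s, PySem.List.pyGet? pvMonths i = some s := by
  cases hg : PySem.List.pyGet? pvMonths i with
  | some s => exact ⟨s, rfl⟩
  | none =>
    rw [PySem.List.pyGet?_eq_none_iff] at hg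
    exact absurd (by simp [PySem.Raise.InRange, pvMonths]; omega) hg

lemma pv_key : ∀ (n : Nat) (cm : Int) (ml : List String),
    -11 ≤ cm → (13 - cm).toNat ≤ n →
    generate_month_list ml cm = generate_month_list_alt ml cm := by
  intro n
  induction n with
  | zero =>
    intro cm ml _ hle
    have hcm : cm > 12 := by omega
    rw [generate_month_list, if_pos hcm]
    unfold generate_month_list_alt
    rw [PySem.List.pyRange_one_eq_nil (by omega)]
    rfl
  | succ n ih =>
    intro cm ml hpre hle
    by_cases hcm : cm > 12
    · rw [generate_month_list, if_pos hcm]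
      unfold generate_month_list_alt
      rw [PySem.List.pyRange_one_eq_nil (by omega)]
      rfl
    · obtain ⟨s, hs⟩ := pvMonths_get_some (cm - 1) (by omega) (by omega)
      rw [generate_month_list, if_neg hcm, hs]
      unfold generate_month_list_alt
      rw [PySem.List.pyRange_one_cons (by omega)]
      simp only [List.foldl_cons, hs]
      exact ih (cm + 1) (ml ++ [s]) (by omega) (by omega)

-- ===== VERDICT (by name: the statement is the Claim_ definition above) =====
theorem generate_month_list_spec : Claim_equal_generate_month_list := by
  intro ml cm _ hpre
  exact pv_key (13 - cm).toNat cm ml hpre le_rfl
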